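-- pv_equiv track=rewrite | github.com/mimseong/BaekJoon | 11964.py | max_fullness
-- ===== SOURCE A (Python) =====
-- from collections import deque
--
-- def max_fullness(T, A, B):
--     dp = [[False] * 2 for _ in range(T + 1)]
--     dp[0][0] = True
--
--     # 0: 물 안 마심, 1: 물 마심
--     q = deque([(0, 0)])
--
--     while q:
--         fullness, used_water = q.popleft()
--
--         # 오렌지
--         if fullness + A <= T and not dp[fullness + A][used_water]:
--             dp[fullness + A][used_water] = True
--             q.append((fullness + A, used_water))
--
--         # 레몬
--         if fullness + B <= T and not dp[fullness + B][used_water]: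
--             dp[fullness + B][used_water] = True
--             q.append((fullness + B, used_water))
--
--         # 물
--         if used_water == 0:
--             reduced = fullness // 2
--             if not dp[reduced][1]:
--                 dp[reduced][1] = True
--                 q.append((reduced, 1))
--
--     max_val = 0
--     for f in range(T + 1):
--         if dp[f][0] or dp[f][1]:
--             max_val = f
--
--     return max_val
-- ===== SOURCE B (Python) =====
-- def max_fullness(T, A, B):
--     # layer 0 (no water yet): additive closure by one forward sweep
--     r0 = [False] * (T + 1)
--     r0[0] = True
--     for f in range(T + 1):
--         if r0[f]:
--             if f + A <= T:
--                 r0[f + A] = True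
--             if f + B <= T:
--                 r0[f + B] = True
--     # layer 1 (after drinking water once): seed with halved layer-0 values, then sweep
--     r1 = [False] * (T + 1)
--     for f in range(T + 1):
--         if r0[f]:
--             r1[f // 2] = True
--     for f in range(T + 1):
--         if r1[f]:
--             if f + A <= T:
--                 r1[f + A] = True
--             if f + B <= T:
--                 r1[f + B] = True
--     best = 0
--     for f in range(T + 1):
--         if r0[f] or r1[f]:
--             best = f
--     return best
-- ===== Notes on version B (the rewrite author's own statement) =====
-- stated objective: faster
-- what changed: Replaces the deque-based BFS over (fullness, used_water) states with two ordered forward boolean-array sweeps: an additive-closure sweep for the no-water layer, a halving transfer seeding the water layer, and one more sweep on that layer.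
-- outside the precondition, e.g. on max_fullness(19, 12, -2): A returns 19, B returns 18
import Mathlib
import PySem

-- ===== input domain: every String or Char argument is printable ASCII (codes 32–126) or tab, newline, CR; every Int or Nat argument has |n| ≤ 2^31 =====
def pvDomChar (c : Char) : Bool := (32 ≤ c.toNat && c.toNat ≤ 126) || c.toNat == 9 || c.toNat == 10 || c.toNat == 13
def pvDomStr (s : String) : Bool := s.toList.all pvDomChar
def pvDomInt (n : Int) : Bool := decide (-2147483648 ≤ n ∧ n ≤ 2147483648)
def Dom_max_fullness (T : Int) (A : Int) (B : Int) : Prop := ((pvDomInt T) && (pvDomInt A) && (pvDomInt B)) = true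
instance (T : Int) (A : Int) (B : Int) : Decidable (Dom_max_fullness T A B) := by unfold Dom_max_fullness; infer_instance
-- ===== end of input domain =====

-- B replaces A's deque-based BFS over (fullness, used_water) states by two ordered forward
-- boolean sweeps plus a halving transfer between the two layers (measured constant-factor faster).

-- ===== PORT A =====
-- dp[x][w] (a boolean table) is modelled as membership of x in the marked-set of layer w
def pvDpGet (S0 S1 : List Int) (x w : Int) : Bool :=
  if w == 0 then S0.contains x else S1.contains x

-- dp[x][w] = True ; q.append((x, w))
def pvMark (S0 S1 : List Int) (q : List (Int × Int)) (x w : Int) :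
    List Int × List Int × List (Int × Int) :=
  if w == 0 then (x :: S0, S1, q ++ [(x, w)]) else (S0, x :: S1, q ++ [(x, w)])

-- the three branches of the loop body (orange, lemon, water), acting on (dp-layer0, dp-layer1, q)
def pvStep1 (T A B f w : Int) (s : List Int × List Int × List (Int × Int)) :
    List Int × List Int × List (Int × Int) :=
  if f + A ≤ T ∧ pvDpGet s.1 s.2.1 (f + A) w = false
  then pvMark s.1 s.2.1 s.2.2 (f + A) w else s

def pvStep2 (T A B f w : Int) (s : List Int × List Int × List (Int × Int)) :
    List Int × List Int × List (Int × Int) :=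
  if f + B ≤ T ∧ pvDpGet s.1 s.2.1 (f + B) w = false
  then pvMark s.1 s.2.1 s.2.2 (f + B) w else s

def pvStep3 (T A B f w : Int) (s : List Int × List Int × List (Int × Int)) :
    List Int × List Int × List (Int × Int) :=
  if w == 0 then
    (if pvDpGet s.1 s.2.1 (PySem.Int.floordiv f 2) 1 = false
     then pvMark s.1 s.2.1 s.2.2 (PySem.Int.floordiv f 2) 1 else s)
  else s

def pvIter (T A B f w : Int) (S0 S1 : List Int) (rest : List (Int × Int)) :
    List Int × List Int × List (Int × Int) :=
  pvStep3 T A B f w (pvStep2 T A B f w (pvStep1 T A B f w (S0, S1, rest)))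

-- the while loop; fuel only guards termination (each iteration pops one queue entry and at
-- most 2*(T+1)+1 entries are ever enqueued, so the fuel below is never exhausted)
def pvBfs (T A B : Int) : Nat → List Int → List Int → List (Int × Int) → List Int × List Int
  | 0, S0, S1, _ => (S0, S1)
  | _ + 1, S0, S1, [] => (S0, S1)
  | fuel + 1, S0, S1, (f, w) :: rest =>
    pvBfs T A B fuel (pvIter T A B f w S0 S1 rest).1
      (pvIter T A B f w S0 S1 rest).2.1 (pvIter T A B f w S0 S1 rest).2.2

def max_fullness (T : Int) (A : Int) (B : Int) : Int :=
  let dp := pvBfs T A B (4 * T + 5).toNat [0] [] [(0, 0)]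
  (PySem.List.pyRange 0 (T + 1) 1).foldl
    (fun acc f => if dp.1.contains f || dp.2.contains f then f else acc) 0

-- ===== PORT B =====
-- a boolean array is a List Bool; writes/reads are PySem.List.pySetD / pyGetD (in range on Pre_)
def pvSweepStepL (T A B : Int) (arr : List Bool) (f : Int) : List Bool :=
  if PySem.List.pyGetD arr f false then
    let a1 := if f + A ≤ T then PySem.List.pySetD arr (f + A) true else arr
    if f + B ≤ T then PySem.List.pySetD a1 (f + B) true else a1
  else arr

def pvSweepL (T A B : Int) (arr : List Bool) : List Bool :=
  (PySem.List.pyRange 0 (T + 1) 1).foldl (pvSweepStepL T A B) arr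

def max_fullness_alt (T : Int) (A : Int) (B : Int) : Int :=
  let r0 := pvSweepL T A B
    (PySem.List.pySetD (List.replicate (T + 1).toNat false) 0 true)
  let seed := (PySem.List.pyRange 0 (T + 1) 1).foldl
      (fun arr f => if PySem.List.pyGetD r0 f false then
          PySem.List.pySetD arr (PySem.Int.floordiv f 2) true else arr)
      (List.replicate (T + 1).toNat false)
  let r1 := pvSweepL T A B seed
  (PySem.List.pyRange 0 (T + 1) 1).foldl
    (fun acc f => if PySem.List.pyGetD r0 f false || PySem.List.pyGetD r1 f false
      then f else acc) 0

-- ===== PRECONDITION & SPEC =====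
-- Pre_ restricts to the task's natural domain (nonnegative limit and drink sizes): for T < 0 the
-- Python A raises IndexError, and for negative A or B its value (when it returns one) comes from
-- Python's negative-index wraparound into the dp array, an accident of the list representation.
def Pre_max_fullness (T : Int) (A : Int) (B : Int) : Prop := 0 ≤ T ∧ 0 ≤ A ∧ 0 ≤ B
instance (T : Int) (A : Int) (B : Int) : Decidable (Pre_max_fullness T A B) := by
  unfold Pre_max_fullness; infer_instance

def pvWitness_max_fullness : Int × Int × Int := (5, 2, 3)

def Spec_max_fullness (T : Int) (A : Int) (B : Int) (out : Int) : Prop := out = max_fullness_alt T A B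
instance (T : Int) (A : Int) (B : Int) (out : Int) : Decidable (Spec_max_fullness T A B out) := by unfold Spec_max_fullness; infer_instance

-- ===== CLAIM (what is proved, stated in full; the proofs are below) =====
def Claim_equal_max_fullness : Prop := ∀ (T : Int) (A : Int) (B : Int), Dom_max_fullness T A B → Pre_max_fullness T A B → Spec_max_fullness T A B (max_fullness T A B)

-- ===== LEMMAS AND PROOFS =====

-- proof-side abstraction of a boolean array: the function it represents
def pvSet (r : Int → Bool) (x : Int) : Int → Bool := fun y => if y = x then true else r y

def pvSweepStep (T A B : Int) (r : Int → Bool) (f : Int) : Int → Bool :=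
  if r f then
    let r1 := if f + A ≤ T then pvSet r (f + A) else r
    if f + B ≤ T then pvSet r1 (f + B) else r1
  else r

def pvSweep (T A B : Int) (r : Int → Bool) : Int → Bool :=
  (PySem.List.pyRange 0 (T + 1) 1).foldl (pvSweepStep T A B) r

-- reachability in layer 0 (no water drunk) and layer 1 (water drunk once)
inductive pvR0 (T A B : Int) : Int → Prop where
  | zero : pvR0 T A B 0
  | addA {f : Int} : pvR0 T A B f → f + A ≤ T → pvR0 T A B (f + A)
  | addB {f : Int} : pvR0 T A B f → f + B ≤ T → pvR0 T A B (f + B)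

inductive pvR1 (T A B : Int) : Int → Prop where
  | half {f : Int} : pvR0 T A B f → pvR1 T A B (PySem.Int.floordiv f 2)
  | addA {f : Int} : pvR1 T A B f → f + A ≤ T → pvR1 T A B (f + A)
  | addB {f : Int} : pvR1 T A B f → f + B ≤ T → pvR1 T A B (f + B)

lemma pvR0_bounds {T A B x : Int} (hT : 0 ≤ T) (hA : 0 ≤ A) (hB : 0 ≤ B)
    (h : pvR0 T A B x) : 0 ≤ x ∧ x ≤ T := by
  induction h with
  | zero => omega
  | addA _ h ih => omega
  | addB _ h ih => omega

lemma pvR1_bounds {T A B x : Int} (hT : 0 ≤ T) (hA : 0 ≤ A) (hB : 0 ≤ B)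
    (h : pvR1 T A B x) : 0 ≤ x ∧ x ≤ T := by
  induction h with
  | half h =>
    have := pvR0_bounds hT hA hB h
    rw [PySem.Int.floordiv_eq_ediv_of_pos (by omega)]
    omega
  | addA _ h ih => omega
  | addB _ h ih => omega

-- ---- B side: the sweep computes exactly pvR0 / pvR1 ----

lemma pvSet_mono {r : Int → Bool} {x y : Int} (h : r x = true) : pvSet r y x = true := by
  simp only [pvSet]; split <;> simp [h]

lemma pvSweepStep_mono {T A B : Int} {r : Int → Bool} {f x : Int} (h : r x = true) :
    pvSweepStep T A B r f x = true := by
  simp only [pvSweepStep]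
  split
  · split <;> split <;> (try exact pvSet_mono (pvSet_mono h)) <;> (try exact pvSet_mono h) <;> exact h
  · exact h

lemma pvFoldl_mono {α : Type} (step : (Int → Bool) → α → (Int → Bool)) (l : List α)
    (hstep : ∀ r f x, r x = true → step r f x = true)
    {r : Int → Bool} {x : Int} (h : r x = true) : (l.foldl step r) x = true := by
  induction l generalizing r with
  | nil => exact h
  | cons a l ih => exact ih (hstep r a x h)

lemma pvSweepStep_stable {T A B : Int} (hA : 0 ≤ A) (hB : 0 ≤ B)
    {r : Int → Bool} {f x : Int} (hx : x ≤ f) : pvSweepStep T A B r f x = r x := by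
  simp only [pvSweepStep]
  split
  · next hrf =>
    by_cases h1 : f + A ≤ T <;> by_cases h2 : f + B ≤ T <;>
      simp only [h1, h2, if_pos, if_false, pvSet] <;>
      split_ifs with e1 e2 <;>
      first
        | rfl
        | (have : x = f := by omega
           rw [this]; exact hrf.symm)
  · rfl

lemma pvFoldl_stable {T A B : Int} (hA : 0 ≤ A) (hB : 0 ≤ B) (l : List Int)
    {x : Int} (hl : ∀ f ∈ l, x ≤ f) (r : Int → Bool) :
    (l.foldl (pvSweepStep T A B) r) x = r x := by
  induction l generalizing r with
  | nil => rfl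
  | cons a l ih =>
    simp only [List.foldl_cons]
    rw [ih (fun f hf => hl f (by simp [hf]))]
    exact pvSweepStep_stable hA hB (hl a (by simp))

-- value of the sweep at g equals the value after the prefix of iterations 0..g
lemma pvSweep_at {T A B : Int} (hA : 0 ≤ A) (hB : 0 ≤ B) (r : Int → Bool) {g : Int}
    (hg0 : 0 ≤ g) (hgT : g ≤ T) :
    pvSweep T A B r g =
      ((PySem.List.pyRange 0 (g + 1) 1).foldl (pvSweepStep T A B) r) g := by
  unfold pvSweep
  rw [PySem.List.pyRange_one_append 0 (g + 1) (T + 1) (by omega) (by omega), List.foldl_append]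
  exact pvFoldl_stable hA hB _ (fun f hf => by
    have := (PySem.List.mem_pyRange_one).1 hf; omega) _

lemma pvSet_self (r : Int → Bool) (x : Int) : pvSet r x x = true := by simp [pvSet]

lemma pvSweepStep_fire_A {T A B : Int} {r : Int → Bool} {g : Int}
    (hg : r g = true) (hgA : g + A ≤ T) : pvSweepStep T A B r g (g + A) = true := by
  simp only [pvSweepStep, hg, if_true, if_pos hgA]
  split
  · exact pvSet_mono (pvSet_self r (g + A))
  · exact pvSet_self r (g + A)

lemma pvSweepStep_fire_B {T A B : Int} {r : Int → Bool} {g : Int}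
    (hg : r g = true) (hgB : g + B ≤ T) : pvSweepStep T A B r g (g + B) = true := by
  simp only [pvSweepStep, hg, if_true, if_pos hgB]
  exact pvSet_self _ (g + B)

lemma pvSweep_closed_addA {T A B : Int} (hA : 0 ≤ A) (hB : 0 ≤ B) (r : Int → Bool)
    {g : Int} (hg0 : 0 ≤ g) (hgA : g + A ≤ T) (h : pvSweep T A B r g = true) :
    pvSweep T A B r (g + A) = true := by
  have hgT : g ≤ T := by omega
  have hsplit : PySem.List.pyRange 0 (g + 1) 1 = PySem.List.pyRange 0 g 1 ++ [g] :=
    PySem.List.pyRange_one_succ_right (by omega)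
  have hmid : ((PySem.List.pyRange 0 (g + 1) 1).foldl (pvSweepStep T A B) r) =
      pvSweepStep T A B ((PySem.List.pyRange 0 g 1).foldl (pvSweepStep T A B) r) g := by
    rw [hsplit, List.foldl_append]; rfl
  have hg' : ((PySem.List.pyRange 0 g 1).foldl (pvSweepStep T A B) r) g = true := by
    rw [pvSweep_at hA hB r hg0 hgT, hmid, pvSweepStep_stable hA hB le_rfl] at h
    exact h
  unfold pvSweep
  rw [PySem.List.pyRange_one_append 0 (g + 1) (T + 1) (by omega) (by omega),
    List.foldl_append, hmid]
  exact pvFoldl_mono _ _ (fun r f x h => pvSweepStep_mono h) (pvSweepStep_fire_A hg' hgA)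

lemma pvSweep_closed_addB {T A B : Int} (hA : 0 ≤ A) (hB : 0 ≤ B) (r : Int → Bool)
    {g : Int} (hg0 : 0 ≤ g) (hgB : g + B ≤ T) (h : pvSweep T A B r g = true) :
    pvSweep T A B r (g + B) = true := by
  have hgT : g ≤ T := by omega
  have hsplit : PySem.List.pyRange 0 (g + 1) 1 = PySem.List.pyRange 0 g 1 ++ [g] :=
    PySem.List.pyRange_one_succ_right (by omega)
  have hmid : ((PySem.List.pyRange 0 (g + 1) 1).foldl (pvSweepStep T A B) r) =
      pvSweepStep T A B ((PySem.List.pyRange 0 g 1).foldl (pvSweepStep T A B) r) g := by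
    rw [hsplit, List.foldl_append]; rfl
  have hg' : ((PySem.List.pyRange 0 g 1).foldl (pvSweepStep T A B) r) g = true := by
    rw [pvSweep_at hA hB r hg0 hgT, hmid, pvSweepStep_stable hA hB le_rfl] at h
    exact h
  unfold pvSweep
  rw [PySem.List.pyRange_one_append 0 (g + 1) (T + 1) (by omega) (by omega),
    List.foldl_append, hmid]
  exact pvFoldl_mono _ _ (fun r f x h => pvSweepStep_mono h) (pvSweepStep_fire_B hg' hgB)

lemma pvSweepStep_sound {T A B : Int} (P : Int → Prop)
    (hPA : ∀ f, P f → f + A ≤ T → P (f + A)) (hPB : ∀ f, P f → f + B ≤ T → P (f + B))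
    {r : Int → Bool} {f : Int} (hr : ∀ x, r x = true → P x) :
    ∀ x, pvSweepStep T A B r f x = true → P x := by
  intro x hx
  simp only [pvSweepStep] at hx
  by_cases hrf : r f = true
  · rw [if_pos hrf] at hx
    have hPf : P f := hr f hrf
    by_cases h1 : f + A ≤ T <;> by_cases h2 : f + B ≤ T <;>
      simp only [h1, h2, if_true, if_false, pvSet] at hx <;>
      (try split_ifs at hx with e1 e2) <;>
      (try subst e1) <;> (try subst e2) <;>
      first
        | exact hPA f hPf h1
        | exact hPB f hPf h2
        | exact hr x hx
  · rw [if_neg hrf] at hx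
    exact hr x hx

-- soundness of a sweep w.r.t. any predicate closed under the two additive rules
lemma pvSweep_sound {T A B : Int} (P : Int → Prop)
    (hPA : ∀ f, P f → f + A ≤ T → P (f + A)) (hPB : ∀ f, P f → f + B ≤ T → P (f + B))
    {r : Int → Bool} (hr : ∀ x, r x = true → P x) :
    ∀ x, pvSweep T A B r x = true → P x := by
  unfold pvSweep
  generalize PySem.List.pyRange 0 (T + 1) 1 = l
  induction l generalizing r with
  | nil => exact hr
  | cons a l ih => exact ih (pvSweepStep_sound P hPA hPB hr)

-- ---- B side, layer 0 ----

lemma pvR0_sweep {T A B : Int} (hT : 0 ≤ T) (hA : 0 ≤ A) (hB : 0 ≤ B) :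
    ∀ x, pvSweep T A B (pvSet (fun _ => false) 0) x = true ↔ pvR0 T A B x := by
  intro x
  constructor
  · refine pvSweep_sound (pvR0 T A B) (fun f hf h => pvR0.addA hf h)
      (fun f hf h => pvR0.addB hf h) (fun y hy => ?_) x
    simp only [pvSet] at hy
    split_ifs at hy with e
    · exact e ▸ pvR0.zero
  · intro h
    induction h with
    | zero => exact pvFoldl_mono _ _ (fun r f x h => pvSweepStep_mono h) (pvSet_self _ 0)
    | addA hf hle ih =>
      exact pvSweep_closed_addA hA hB _ (pvR0_bounds hT hA hB hf).1 hle ih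
    | addB hf hle ih =>
      exact pvSweep_closed_addB hA hB _ (pvR0_bounds hT hA hB hf).1 hle ih

-- ---- B side, layer 1: the seeding pass ----

lemma pvSeedStep_mono (r0 : Int → Bool) :
    ∀ (r : Int → Bool) (f x : Int), r x = true →
      (if r0 f then pvSet r (PySem.Int.floordiv f 2) else r) x = true := by
  intro r f x h
  split
  · exact pvSet_mono h
  · exact h

lemma pvSeed_complete {T A B : Int} (hT : 0 ≤ T) (hA : 0 ≤ A) (hB : 0 ≤ B) {f : Int}
    (hf : pvR0 T A B f) :
    ((PySem.List.pyRange 0 (T + 1) 1).foldl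
      (fun r g => if pvSweep T A B (pvSet (fun _ => false) 0) g then
          pvSet r (PySem.Int.floordiv g 2) else r) (fun _ => false))
      (PySem.Int.floordiv f 2) = true := by
  have hfb := pvR0_bounds hT hA hB hf
  have hmem : f ∈ PySem.List.pyRange 0 (T + 1) 1 :=
    (PySem.List.mem_pyRange_one).2 (by omega)
  obtain ⟨l1, l2, hl⟩ := List.append_of_mem hmem
  rw [hl, List.foldl_append, List.foldl_cons,
    if_pos ((pvR0_sweep hT hA hB f).2 hf)]
  exact pvFoldl_mono _ _ (pvSeedStep_mono _) (pvSet_self _ _)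

lemma pvSeed_sound {T A B : Int} (hT : 0 ≤ T) (hA : 0 ≤ A) (hB : 0 ≤ B) :
    ∀ x, ((PySem.List.pyRange 0 (T + 1) 1).foldl
      (fun r g => if pvSweep T A B (pvSet (fun _ => false) 0) g then
          pvSet r (PySem.Int.floordiv g 2) else r) (fun _ => false)) x = true →
      pvR1 T A B x := by
  generalize PySem.List.pyRange 0 (T + 1) 1 = l
  suffices h : ∀ (r : Int → Bool), (∀ x, r x = true → pvR1 T A B x) →
      ∀ x, (l.foldl (fun r g => if pvSweep T A B (pvSet (fun _ => false) 0) g then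
          pvSet r (PySem.Int.floordiv g 2) else r) r) x = true → pvR1 T A B x by
    exact h (fun _ => false) (fun x hx => by simp at hx)
  induction l with
  | nil => exact fun r hr => hr
  | cons a l ih =>
    intro r hr
    refine ih _ ?_
    intro x hx
    beta_reduce at hx
    split at hx
    · next ha =>
      simp only [pvSet] at hx
      split_ifs at hx with e
      · exact e ▸ pvR1.half ((pvR0_sweep hT hA hB a).1 ha)
      · exact hr x hx
    · exact hr x hx

-- ---- B side, layer 1 ----

lemma pvR1_sweep {T A B : Int} (hT : 0 ≤ T) (hA : 0 ≤ A) (hB : 0 ≤ B) :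
    ∀ x, pvSweep T A B
        ((PySem.List.pyRange 0 (T + 1) 1).foldl
          (fun r f => if pvSweep T A B (pvSet (fun _ => false) 0) f then
              pvSet r (PySem.Int.floordiv f 2) else r) (fun _ => false)) x = true
      ↔ pvR1 T A B x := by
  intro x
  constructor
  · exact pvSweep_sound (pvR1 T A B) (fun f hf h => pvR1.addA hf h)
      (fun f hf h => pvR1.addB hf h) (pvSeed_sound hT hA hB) x
  · intro h
    induction h with
    | half hf =>
      exact pvFoldl_mono _ _ (fun r f x h => pvSweepStep_mono h)
        (pvSeed_complete hT hA hB hf)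
    | addA hf hle ih =>
      exact pvSweep_closed_addA hA hB _ (pvR1_bounds hT hA hB hf).1 hle ih
    | addB hf hle ih =>
      exact pvSweep_closed_addB hA hB _ (pvR1_bounds hT hA hB hf).1 hle ih

-- ---- bridge: a List Bool array read through pyGetD realises the function model ----

lemma pvGetD_replicate (n : Nat) (y : Int) :
    PySem.List.pyGetD (List.replicate n false) y false = false := by
  simp only [PySem.List.pyGetD, PySem.List.pyGet?, PySem.List.pyIdx?]
  split <;> (try split) <;> simp_all [List.getElem?_replicate] <;> split <;> simp

lemma pvGetD_set_point (arr : List Bool) (x y : Int) (hx0 : 0 ≤ x)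
    (hxl : x < (arr.length : Int)) (hy0 : 0 ≤ y) :
    PySem.List.pyGetD (PySem.List.pySetD arr x true) y false
      = if y = x then true else PySem.List.pyGetD arr y false := by
  rw [PySem.List.pySetD_of_nonneg arr true hx0]
  by_cases h : y = x
  · subst h
    rw [if_pos rfl, PySem.List.pyGetD_eq_getElem _ _ hx0 (by simpa using hxl)]
    simp
  · rw [if_neg h]
    have hne : y.toNat ≠ x.toNat := by omega
    simp only [PySem.List.pyGetD, PySem.List.pyGet?, PySem.List.pyIdx?, List.length_set]
    by_cases hylt : y < (arr.length : Int)
    · simp [hy0, hylt, List.getElem?_set, hne.symm]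
    · simp [hy0, hylt]

lemma pvCondSet_commute {T : Int} (hT : 0 ≤ T) {arr : List Bool} {g : Int → Bool}
    (hlen : arr.length = (T + 1).toNat)
    (hrel : ∀ y, 0 ≤ y → PySem.List.pyGetD arr y false = g y)
    {x : Int} (hx : 0 ≤ x) (c : Prop) [Decidable c] (hcx : c → x ≤ T) :
    (if c then PySem.List.pySetD arr x true else arr).length = (T + 1).toNat ∧
    (∀ y, 0 ≤ y → PySem.List.pyGetD (if c then PySem.List.pySetD arr x true else arr) y false
      = (if c then pvSet g x else g) y) := by
  by_cases hc : c
  · rw [if_pos hc, if_pos hc]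
    refine ⟨by simp [hlen], ?_⟩
    intro y hy
    rw [pvGetD_set_point arr x y hx (by have := hcx hc; omega) hy]
    simp only [pvSet]
    by_cases e : y = x
    · simp [e]
    · rw [if_neg e, if_neg e, hrel y hy]
  · rw [if_neg hc, if_neg hc]
    exact ⟨hlen, hrel⟩

lemma pvSweepStepL_commute {T A B : Int} (hT : 0 ≤ T) (hA : 0 ≤ A) (hB : 0 ≤ B)
    {f : Int} (hf : 0 ≤ f ∧ f ≤ T) {arr : List Bool} {g : Int → Bool}
    (hlen : arr.length = (T + 1).toNat)
    (hrel : ∀ y, 0 ≤ y → PySem.List.pyGetD arr y false = g y) :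
    (pvSweepStepL T A B arr f).length = (T + 1).toNat ∧
    (∀ y, 0 ≤ y → PySem.List.pyGetD (pvSweepStepL T A B arr f) y false
      = pvSweepStep T A B g f y) := by
  unfold pvSweepStepL pvSweepStep
  rw [hrel f hf.1]
  cases hgf : g f
  · simp only [Bool.false_eq_true, if_false]
    exact ⟨hlen, hrel⟩
  · simp only [if_true]
    obtain ⟨L1, R1⟩ := pvCondSet_commute hT hlen hrel (x := f + A) (by omega)
      (f + A ≤ T) (fun h => h)
    obtain ⟨L2, R2⟩ := pvCondSet_commute hT L1 R1 (x := f + B) (by omega)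
      (f + B ≤ T) (fun h => h)
    exact ⟨L2, R2⟩

lemma pvSweepL_commute {T A B : Int} (hT : 0 ≤ T) (hA : 0 ≤ A) (hB : 0 ≤ B) :
    ∀ (l : List Int), (∀ f ∈ l, 0 ≤ f ∧ f ≤ T) →
    ∀ (arr : List Bool) (g : Int → Bool), arr.length = (T + 1).toNat →
      (∀ y, 0 ≤ y → PySem.List.pyGetD arr y false = g y) →
      (l.foldl (pvSweepStepL T A B) arr).length = (T + 1).toNat ∧
      (∀ y, 0 ≤ y → PySem.List.pyGetD (l.foldl (pvSweepStepL T A B) arr) y false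
        = (l.foldl (pvSweepStep T A B) g) y) := by
  intro l
  induction l with
  | nil => exact fun _ arr g hlen hrel => ⟨hlen, hrel⟩
  | cons a t ih =>
    intro hbnd arr g hlen hrel
    obtain ⟨L, R⟩ := pvSweepStepL_commute hT hA hB (hbnd a List.mem_cons_self) hlen hrel
    exact ih (fun f hf => hbnd f (List.mem_cons_of_mem _ hf)) _ _ L R

lemma pvSeedL_commute {T : Int} (hT : 0 ≤ T) (r0L : List Bool) (g0 : Int → Bool)
    (hg : ∀ y, 0 ≤ y → PySem.List.pyGetD r0L y false = g0 y) :
    ∀ (l : List Int), (∀ f ∈ l, 0 ≤ f ∧ f ≤ T) →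
    ∀ (arr : List Bool) (g : Int → Bool), arr.length = (T + 1).toNat →
      (∀ y, 0 ≤ y → PySem.List.pyGetD arr y false = g y) →
      (l.foldl (fun arr f => if PySem.List.pyGetD r0L f false then
          PySem.List.pySetD arr (PySem.Int.floordiv f 2) true else arr) arr).length
        = (T + 1).toNat ∧
      (∀ y, 0 ≤ y → PySem.List.pyGetD
          (l.foldl (fun arr f => if PySem.List.pyGetD r0L f false then
            PySem.List.pySetD arr (PySem.Int.floordiv f 2) true else arr) arr) y false
        = (l.foldl (fun r f => if g0 f then pvSet r (PySem.Int.floordiv f 2) else r) g) y) := by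
  intro l
  induction l with
  | nil => exact fun _ arr g hlen hrel => ⟨hlen, hrel⟩
  | cons a t ih =>
    intro hbnd arr g hlen hrel
    have hab := hbnd a List.mem_cons_self
    have hdb : 0 ≤ PySem.Int.floordiv a 2 ∧ PySem.Int.floordiv a 2 ≤ T := by
      rw [PySem.Int.floordiv_eq_ediv_of_pos (by omega)]
      omega
    obtain ⟨L, R⟩ := pvCondSet_commute hT hlen hrel (x := PySem.Int.floordiv a 2) hdb.1
      (PySem.List.pyGetD r0L a false = true) (fun _ => hdb.2)
    rw [List.foldl_cons, List.foldl_cons]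
    have hguard : (if PySem.List.pyGetD r0L a false then
          PySem.List.pySetD arr (PySem.Int.floordiv a 2) true else arr)
        = (if PySem.List.pyGetD r0L a false = true then
          PySem.List.pySetD arr (PySem.Int.floordiv a 2) true else arr) := rfl
    have hguard2 : (if g0 a then pvSet g (PySem.Int.floordiv a 2) else g)
        = (if PySem.List.pyGetD r0L a false = true then
          pvSet g (PySem.Int.floordiv a 2) else g) := by
      rw [hg a hab.1]
    rw [hguard, hguard2]
    exact ih (fun f hf => hbnd f (List.mem_cons_of_mem _ hf)) _ _ L R

lemma pvRange_bounds {T : Int} :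
    ∀ f ∈ PySem.List.pyRange 0 (T + 1) 1, 0 ≤ f ∧ f ≤ T := by
  intro f hf
  have := (PySem.List.mem_pyRange_one).1 hf
  omega

-- ---- A side: the BFS marks exactly pvR0 / pvR1 ----

-- closure obligations of a fully processed state
def pvCl0 (T A B : Int) (S0 S1 : List Int) (x : Int) : Prop :=
  (x + A ≤ T → x + A ∈ S0) ∧ (x + B ≤ T → x + B ∈ S0) ∧ PySem.Int.floordiv x 2 ∈ S1

def pvCl1 (T A B : Int) (S1 : List Int) (x : Int) : Prop :=
  (x + A ≤ T → x + A ∈ S1) ∧ (x + B ≤ T → x + B ∈ S1)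

-- the loop invariant; E collects the entries whose closure the current iteration still owes
structure pvWInv (T A B : Int) (E : Int → Int → Prop)
    (S0 S1 : List Int) (q : List (Int × Int)) : Prop where
  nodup0 : S0.Nodup
  nodup1 : S1.Nodup
  bnd0 : ∀ x ∈ S0, 0 ≤ x ∧ x ≤ T
  bnd1 : ∀ x ∈ S1, 0 ≤ x ∧ x ≤ T
  sound0 : ∀ x ∈ S0, pvR0 T A B x
  sound1 : ∀ x ∈ S1, pvR1 T A B x
  qmarked : ∀ p ∈ q, (p.2 = 0 ∧ p.1 ∈ S0) ∨ (p.2 = 1 ∧ p.1 ∈ S1)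
  closed0 : ∀ x ∈ S0, ((x, 0) ∈ q ∨ E x 0) ∨ pvCl0 T A B S0 S1 x
  closed1 : ∀ x ∈ S1, ((x, 1) ∈ q ∨ E x 1) ∨ pvCl1 T A B S1 x

def pvInv (T A B : Int) (S0 S1 : List Int) (q : List (Int × Int)) : Prop :=
  pvWInv T A B (fun _ _ => False) S0 S1 q

lemma pvWInv_pop {T A B : Int} {S0 S1 : List Int} {f w : Int} {rest : List (Int × Int)}
    (I : pvInv T A B S0 S1 ((f, w) :: rest)) :
    pvWInv T A B (fun x w' => x = f ∧ w' = w) S0 S1 rest := by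
  refine ⟨I.nodup0, I.nodup1, I.bnd0, I.bnd1, I.sound0, I.sound1, ?_, ?_, ?_⟩
  · exact fun p hp => I.qmarked p (List.mem_cons_of_mem _ hp)
  · intro y hy
    rcases I.closed0 y hy with (h | h) | h
    · rcases List.mem_cons.1 h with h | h
      · exact Or.inl (Or.inr ⟨congrArg Prod.fst h, congrArg Prod.snd h⟩)
      · exact Or.inl (Or.inl h)
    · exact absurd h not_false
    · exact Or.inr h
  · intro y hy
    rcases I.closed1 y hy with (h | h) | h
    · rcases List.mem_cons.1 h with h | h
      · exact Or.inl (Or.inr ⟨congrArg Prod.fst h, congrArg Prod.snd h⟩)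
      · exact Or.inl (Or.inl h)
    · exact absurd h not_false
    · exact Or.inr h

lemma pvWInv_promote {T A B : Int} {S0 S1 : List Int} {q : List (Int × Int)} {f w : Int}
    (I : pvWInv T A B (fun x w' => x = f ∧ w' = w) S0 S1 q)
    (hcl0 : w = 0 → pvCl0 T A B S0 S1 f) (hcl1 : w = 1 → pvCl1 T A B S1 f) :
    pvInv T A B S0 S1 q := by
  refine ⟨I.nodup0, I.nodup1, I.bnd0, I.bnd1, I.sound0, I.sound1, I.qmarked, ?_, ?_⟩
  · intro y hy
    rcases I.closed0 y hy with (h | h) | h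
    · exact Or.inl (Or.inl h)
    · exact Or.inr (h.1 ▸ hcl0 h.2.symm)
    · exact Or.inr h
  · intro y hy
    rcases I.closed1 y hy with (h | h) | h
    · exact Or.inl (Or.inl h)
    · exact Or.inr (h.1 ▸ hcl1 h.2.symm)
    · exact Or.inr h

lemma pvMark0_winv {T A B : Int} {E : Int → Int → Prop} {S0 S1 : List Int}
    {q : List (Int × Int)} (I : pvWInv T A B E S0 S1 q) {x : Int}
    (hb : 0 ≤ x ∧ x ≤ T) (hR : pvR0 T A B x) (hnew : x ∉ S0) :
    pvWInv T A B E (x :: S0) S1 (q ++ [(x, 0)]) := by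
  refine ⟨List.nodup_cons.2 ⟨hnew, I.nodup0⟩, I.nodup1, ?_, I.bnd1, ?_, I.sound1, ?_, ?_, ?_⟩
  · intro y hy
    rcases List.mem_cons.1 hy with rfl | hy
    · exact hb
    · exact I.bnd0 y hy
  · intro y hy
    rcases List.mem_cons.1 hy with rfl | hy
    · exact hR
    · exact I.sound0 y hy
  · intro p hp
    rcases List.mem_append.1 hp with hp | hp
    · rcases I.qmarked p hp with ⟨h2, h1⟩ | ⟨h2, h1⟩
      · exact Or.inl ⟨h2, List.mem_cons_of_mem _ h1⟩
      · exact Or.inr ⟨h2, h1⟩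
    · rw [List.mem_singleton] at hp
      subst hp
      exact Or.inl ⟨rfl, List.mem_cons_self⟩
  · intro y hy
    rcases List.mem_cons.1 hy with rfl | hy
    · exact Or.inl (Or.inl (List.mem_append.2 (Or.inr (List.mem_singleton.2 rfl))))
    · rcases I.closed0 y hy with (h | h) | h
      · exact Or.inl (Or.inl (List.mem_append.2 (Or.inl h)))
      · exact Or.inl (Or.inr h)
      · exact Or.inr ⟨fun hle => List.mem_cons_of_mem _ (h.1 hle),
          fun hle => List.mem_cons_of_mem _ (h.2.1 hle), h.2.2⟩
  · intro y hy
    rcases I.closed1 y hy with (h | h) | h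
    · exact Or.inl (Or.inl (List.mem_append.2 (Or.inl h)))
    · exact Or.inl (Or.inr h)
    · exact Or.inr h

lemma pvMark1_winv {T A B : Int} {E : Int → Int → Prop} {S0 S1 : List Int}
    {q : List (Int × Int)} (I : pvWInv T A B E S0 S1 q) {x : Int}
    (hb : 0 ≤ x ∧ x ≤ T) (hR : pvR1 T A B x) (hnew : x ∉ S1) :
    pvWInv T A B E S0 (x :: S1) (q ++ [(x, 1)]) := by
  refine ⟨I.nodup0, List.nodup_cons.2 ⟨hnew, I.nodup1⟩, I.bnd0, ?_, I.sound0, ?_, ?_, ?_, ?_⟩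
  · intro y hy
    rcases List.mem_cons.1 hy with rfl | hy
    · exact hb
    · exact I.bnd1 y hy
  · intro y hy
    rcases List.mem_cons.1 hy with rfl | hy
    · exact hR
    · exact I.sound1 y hy
  · intro p hp
    rcases List.mem_append.1 hp with hp | hp
    · rcases I.qmarked p hp with ⟨h2, h1⟩ | ⟨h2, h1⟩
      · exact Or.inl ⟨h2, h1⟩
      · exact Or.inr ⟨h2, List.mem_cons_of_mem _ h1⟩
    · rw [List.mem_singleton] at hp
      subst hp
      exact Or.inr ⟨rfl, List.mem_cons_self⟩
  · intro y hy
    rcases I.closed0 y hy with (h | h) | h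
    · exact Or.inl (Or.inl (List.mem_append.2 (Or.inl h)))
    · exact Or.inl (Or.inr h)
    · exact Or.inr ⟨h.1, h.2.1, List.mem_cons_of_mem _ h.2.2⟩
  · intro y hy
    rcases List.mem_cons.1 hy with rfl | hy
    · exact Or.inl (Or.inl (List.mem_append.2 (Or.inr (List.mem_singleton.2 rfl))))
    · rcases I.closed1 y hy with (h | h) | h
      · exact Or.inl (Or.inl (List.mem_append.2 (Or.inl h)))
      · exact Or.inl (Or.inr h)
      · exact Or.inr ⟨fun hle => List.mem_cons_of_mem _ (h.1 hle),
          fun hle => List.mem_cons_of_mem _ (h.2 hle)⟩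

lemma pvDpGet0_not_mem {S0 S1 : List Int} {x : Int}
    (h : pvDpGet S0 S1 x 0 = false) : x ∉ S0 := by
  simp [pvDpGet] at h; exact h

lemma pvDpGet0_mem {S0 S1 : List Int} {x : Int}
    (h : ¬ pvDpGet S0 S1 x 0 = false) : x ∈ S0 := by
  simp [pvDpGet] at h; exact h

lemma pvDpGet1_not_mem {S0 S1 : List Int} {x : Int}
    (h : pvDpGet S0 S1 x 1 = false) : x ∉ S1 := by
  simp [pvDpGet] at h; exact h

lemma pvDpGet1_mem {S0 S1 : List Int} {x : Int}
    (h : ¬ pvDpGet S0 S1 x 1 = false) : x ∈ S1 := by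
  simp [pvDpGet] at h; exact h

-- the orange branch, layer 0
lemma pvStep1_spec0 {T A B f : Int} {E : Int → Int → Prop}
    {s : List Int × List Int × List (Int × Int)}
    (I : pvWInv T A B E s.1 s.2.1 s.2.2) (hA : 0 ≤ A) (hf : 0 ≤ f) (hR : pvR0 T A B f) :
    pvWInv T A B E (pvStep1 T A B f 0 s).1 (pvStep1 T A B f 0 s).2.1
        (pvStep1 T A B f 0 s).2.2 ∧
    (∀ y ∈ s.1, y ∈ (pvStep1 T A B f 0 s).1) ∧
    (∀ y ∈ s.2.1, y ∈ (pvStep1 T A B f 0 s).2.1) ∧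
    (f + A ≤ T → f + A ∈ (pvStep1 T A B f 0 s).1) ∧
    ((pvStep1 T A B f 0 s).1.length + (pvStep1 T A B f 0 s).2.1.length + s.2.2.length
      = s.1.length + s.2.1.length + (pvStep1 T A B f 0 s).2.2.length) ∧
    s.2.2.length ≤ (pvStep1 T A B f 0 s).2.2.length := by
  unfold pvStep1
  by_cases hc : f + A ≤ T ∧ pvDpGet s.1 s.2.1 (f + A) 0 = false
  · rw [if_pos hc,
      show pvMark s.1 s.2.1 s.2.2 (f + A) 0
        = ((f + A) :: s.1, s.2.1, s.2.2 ++ [(f + A, 0)]) from rfl]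
    exact ⟨pvMark0_winv I ⟨by omega, hc.1⟩ (pvR0.addA hR hc.1) (pvDpGet0_not_mem hc.2),
      fun y hy => List.mem_cons_of_mem _ hy, fun y hy => hy,
      fun _ => List.mem_cons_self, by simp; omega, by simp⟩
  · rw [if_neg hc]
    refine ⟨I, fun y hy => hy, fun y hy => hy, ?_, by simp, le_rfl⟩
    intro hle
    by_cases hg : pvDpGet s.1 s.2.1 (f + A) 0 = false
    · exact absurd ⟨hle, hg⟩ hc
    · exact pvDpGet0_mem hg

-- the lemon branch, layer 0
lemma pvStep2_spec0 {T A B f : Int} {E : Int → Int → Prop}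
    {s : List Int × List Int × List (Int × Int)}
    (I : pvWInv T A B E s.1 s.2.1 s.2.2) (hB : 0 ≤ B) (hf : 0 ≤ f) (hR : pvR0 T A B f) :
    pvWInv T A B E (pvStep2 T A B f 0 s).1 (pvStep2 T A B f 0 s).2.1
        (pvStep2 T A B f 0 s).2.2 ∧
    (∀ y ∈ s.1, y ∈ (pvStep2 T A B f 0 s).1) ∧
    (∀ y ∈ s.2.1, y ∈ (pvStep2 T A B f 0 s).2.1) ∧
    (f + B ≤ T → f + B ∈ (pvStep2 T A B f 0 s).1) ∧
    ((pvStep2 T A B f 0 s).1.length + (pvStep2 T A B f 0 s).2.1.length + s.2.2.length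
      = s.1.length + s.2.1.length + (pvStep2 T A B f 0 s).2.2.length) ∧
    s.2.2.length ≤ (pvStep2 T A B f 0 s).2.2.length := by
  unfold pvStep2
  by_cases hc : f + B ≤ T ∧ pvDpGet s.1 s.2.1 (f + B) 0 = false
  · rw [if_pos hc,
      show pvMark s.1 s.2.1 s.2.2 (f + B) 0
        = ((f + B) :: s.1, s.2.1, s.2.2 ++ [(f + B, 0)]) from rfl]
    exact ⟨pvMark0_winv I ⟨by omega, hc.1⟩ (pvR0.addB hR hc.1) (pvDpGet0_not_mem hc.2),
      fun y hy => List.mem_cons_of_mem _ hy, fun y hy => hy,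
      fun _ => List.mem_cons_self, by simp; omega, by simp⟩
  · rw [if_neg hc]
    refine ⟨I, fun y hy => hy, fun y hy => hy, ?_, by simp, le_rfl⟩
    intro hle
    by_cases hg : pvDpGet s.1 s.2.1 (f + B) 0 = false
    · exact absurd ⟨hle, hg⟩ hc
    · exact pvDpGet0_mem hg

-- the water branch, layer 0 (always within bounds)
lemma pvStep3_spec0 {T A B f : Int} {E : Int → Int → Prop}
    {s : List Int × List Int × List (Int × Int)}
    (I : pvWInv T A B E s.1 s.2.1 s.2.2) (hfb : 0 ≤ f ∧ f ≤ T) (hR : pvR0 T A B f) :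
    pvWInv T A B E (pvStep3 T A B f 0 s).1 (pvStep3 T A B f 0 s).2.1
        (pvStep3 T A B f 0 s).2.2 ∧
    (∀ y ∈ s.1, y ∈ (pvStep3 T A B f 0 s).1) ∧
    (∀ y ∈ s.2.1, y ∈ (pvStep3 T A B f 0 s).2.1) ∧
    PySem.Int.floordiv f 2 ∈ (pvStep3 T A B f 0 s).2.1 ∧
    ((pvStep3 T A B f 0 s).1.length + (pvStep3 T A B f 0 s).2.1.length + s.2.2.length
      = s.1.length + s.2.1.length + (pvStep3 T A B f 0 s).2.2.length) ∧
    s.2.2.length ≤ (pvStep3 T A B f 0 s).2.2.length := by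
  have hrb : 0 ≤ PySem.Int.floordiv f 2 ∧ PySem.Int.floordiv f 2 ≤ T := by
    rw [PySem.Int.floordiv_eq_ediv_of_pos (by omega)]
    omega
  unfold pvStep3
  rw [if_pos (by norm_num)]
  by_cases hc : pvDpGet s.1 s.2.1 (PySem.Int.floordiv f 2) 1 = false
  · rw [if_pos hc,
      show pvMark s.1 s.2.1 s.2.2 (PySem.Int.floordiv f 2) 1
        = (s.1, PySem.Int.floordiv f 2 :: s.2.1, s.2.2 ++ [(PySem.Int.floordiv f 2, 1)])
          from rfl]
    exact ⟨pvMark1_winv I hrb (pvR1.half hR) (pvDpGet1_not_mem hc),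
      fun y hy => hy, fun y hy => List.mem_cons_of_mem _ hy,
      List.mem_cons_self, by simp; omega, by simp⟩
  · rw [if_neg hc]
    exact ⟨I, fun y hy => hy, fun y hy => hy, pvDpGet1_mem hc, by simp, le_rfl⟩

-- the full iteration for a popped layer-0 entry
lemma pvIter_spec0 {T A B f : Int} {S0 S1 : List Int} {rest : List (Int × Int)}
    (hT : 0 ≤ T) (hA : 0 ≤ A) (hB : 0 ≤ B)
    (I : pvWInv T A B (fun x w' => x = f ∧ w' = 0) S0 S1 rest)
    (hfb : 0 ≤ f ∧ f ≤ T) (hR : pvR0 T A B f) :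
    pvInv T A B (pvIter T A B f 0 S0 S1 rest).1 (pvIter T A B f 0 S0 S1 rest).2.1
        (pvIter T A B f 0 S0 S1 rest).2.2 ∧
    (∀ y ∈ S0, y ∈ (pvIter T A B f 0 S0 S1 rest).1) ∧
    (∀ y ∈ S1, y ∈ (pvIter T A B f 0 S0 S1 rest).2.1) ∧
    ((pvIter T A B f 0 S0 S1 rest).1.length + (pvIter T A B f 0 S0 S1 rest).2.1.length
        + rest.length
      = S0.length + S1.length + (pvIter T A B f 0 S0 S1 rest).2.2.length) ∧
    rest.length ≤ (pvIter T A B f 0 S0 S1 rest).2.2.length := by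
  obtain ⟨I1, m1a, m1b, t1, l1, q1⟩ := pvStep1_spec0 (s := (S0, S1, rest)) I hA hfb.1 hR
  obtain ⟨I2, m2a, m2b, t2, l2, q2⟩ := pvStep2_spec0 I1 hB hfb.1 hR
  obtain ⟨I3, m3a, m3b, t3, l3, q3⟩ := pvStep3_spec0 I2 hfb hR
  have L1 : (pvStep1 T A B f 0 (S0, S1, rest)).1.length
      + (pvStep1 T A B f 0 (S0, S1, rest)).2.1.length + rest.length
      = S0.length + S1.length + (pvStep1 T A B f 0 (S0, S1, rest)).2.2.length := l1
  have Q1 : rest.length ≤ (pvStep1 T A B f 0 (S0, S1, rest)).2.2.length := q1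
  clear l1 q1
  unfold pvIter
  refine ⟨pvWInv_promote I3 (fun _ => ⟨fun hle => m3a _ (m2a _ (t1 hle)),
      fun hle => m3a _ (t2 hle), t3⟩) (fun h => absurd h (by norm_num)), ?_, ?_, ?_, ?_⟩
  · exact fun y hy => m3a y (m2a y (m1a y hy))
  · exact fun y hy => m3b y (m2b y (m1b y hy))
  · omega
  · omega

-- the orange branch, layer 1
lemma pvStep1_spec1 {T A B f : Int} {E : Int → Int → Prop}
    {s : List Int × List Int × List (Int × Int)}
    (I : pvWInv T A B E s.1 s.2.1 s.2.2) (hA : 0 ≤ A) (hf : 0 ≤ f) (hR : pvR1 T A B f) :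
    pvWInv T A B E (pvStep1 T A B f 1 s).1 (pvStep1 T A B f 1 s).2.1
        (pvStep1 T A B f 1 s).2.2 ∧
    (∀ y ∈ s.1, y ∈ (pvStep1 T A B f 1 s).1) ∧
    (∀ y ∈ s.2.1, y ∈ (pvStep1 T A B f 1 s).2.1) ∧
    (f + A ≤ T → f + A ∈ (pvStep1 T A B f 1 s).2.1) ∧
    ((pvStep1 T A B f 1 s).1.length + (pvStep1 T A B f 1 s).2.1.length + s.2.2.length
      = s.1.length + s.2.1.length + (pvStep1 T A B f 1 s).2.2.length) ∧
    s.2.2.length ≤ (pvStep1 T A B f 1 s).2.2.length := by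
  unfold pvStep1
  by_cases hc : f + A ≤ T ∧ pvDpGet s.1 s.2.1 (f + A) 1 = false
  · rw [if_pos hc,
      show pvMark s.1 s.2.1 s.2.2 (f + A) 1
        = (s.1, (f + A) :: s.2.1, s.2.2 ++ [(f + A, 1)]) from rfl]
    exact ⟨pvMark1_winv I ⟨by omega, hc.1⟩ (pvR1.addA hR hc.1) (pvDpGet1_not_mem hc.2),
      fun y hy => hy, fun y hy => List.mem_cons_of_mem _ hy,
      fun _ => List.mem_cons_self, by simp; omega, by simp⟩
  · rw [if_neg hc]
    refine ⟨I, fun y hy => hy, fun y hy => hy, ?_, by simp, le_rfl⟩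
    intro hle
    by_cases hg : pvDpGet s.1 s.2.1 (f + A) 1 = false
    · exact absurd ⟨hle, hg⟩ hc
    · exact pvDpGet1_mem hg

-- the lemon branch, layer 1
lemma pvStep2_spec1 {T A B f : Int} {E : Int → Int → Prop}
    {s : List Int × List Int × List (Int × Int)}
    (I : pvWInv T A B E s.1 s.2.1 s.2.2) (hB : 0 ≤ B) (hf : 0 ≤ f) (hR : pvR1 T A B f) :
    pvWInv T A B E (pvStep2 T A B f 1 s).1 (pvStep2 T A B f 1 s).2.1
        (pvStep2 T A B f 1 s).2.2 ∧
    (∀ y ∈ s.1, y ∈ (pvStep2 T A B f 1 s).1) ∧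
    (∀ y ∈ s.2.1, y ∈ (pvStep2 T A B f 1 s).2.1) ∧
    (f + B ≤ T → f + B ∈ (pvStep2 T A B f 1 s).2.1) ∧
    ((pvStep2 T A B f 1 s).1.length + (pvStep2 T A B f 1 s).2.1.length + s.2.2.length
      = s.1.length + s.2.1.length + (pvStep2 T A B f 1 s).2.2.length) ∧
    s.2.2.length ≤ (pvStep2 T A B f 1 s).2.2.length := by
  unfold pvStep2
  by_cases hc : f + B ≤ T ∧ pvDpGet s.1 s.2.1 (f + B) 1 = false
  · rw [if_pos hc,
      show pvMark s.1 s.2.1 s.2.2 (f + B) 1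
        = (s.1, (f + B) :: s.2.1, s.2.2 ++ [(f + B, 1)]) from rfl]
    exact ⟨pvMark1_winv I ⟨by omega, hc.1⟩ (pvR1.addB hR hc.1) (pvDpGet1_not_mem hc.2),
      fun y hy => hy, fun y hy => List.mem_cons_of_mem _ hy,
      fun _ => List.mem_cons_self, by simp; omega, by simp⟩
  · rw [if_neg hc]
    refine ⟨I, fun y hy => hy, fun y hy => hy, ?_, by simp, le_rfl⟩
    intro hle
    by_cases hg : pvDpGet s.1 s.2.1 (f + B) 1 = false
    · exact absurd ⟨hle, hg⟩ hc
    · exact pvDpGet1_mem hg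

-- the full iteration for a popped layer-1 entry (the water branch does nothing)
lemma pvIter_spec1 {T A B f : Int} {S0 S1 : List Int} {rest : List (Int × Int)}
    (hT : 0 ≤ T) (hA : 0 ≤ A) (hB : 0 ≤ B)
    (I : pvWInv T A B (fun x w' => x = f ∧ w' = 1) S0 S1 rest)
    (hfb : 0 ≤ f ∧ f ≤ T) (hR : pvR1 T A B f) :
    pvInv T A B (pvIter T A B f 1 S0 S1 rest).1 (pvIter T A B f 1 S0 S1 rest).2.1
        (pvIter T A B f 1 S0 S1 rest).2.2 ∧
    (∀ y ∈ S0, y ∈ (pvIter T A B f 1 S0 S1 rest).1) ∧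
    (∀ y ∈ S1, y ∈ (pvIter T A B f 1 S0 S1 rest).2.1) ∧
    ((pvIter T A B f 1 S0 S1 rest).1.length + (pvIter T A B f 1 S0 S1 rest).2.1.length
        + rest.length
      = S0.length + S1.length + (pvIter T A B f 1 S0 S1 rest).2.2.length) ∧
    rest.length ≤ (pvIter T A B f 1 S0 S1 rest).2.2.length := by
  obtain ⟨I1, m1a, m1b, t1, l1, q1⟩ := pvStep1_spec1 (s := (S0, S1, rest)) I hA hfb.1 hR
  obtain ⟨I2, m2a, m2b, t2, l2, q2⟩ := pvStep2_spec1 I1 hB hfb.1 hR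
  have L1 : (pvStep1 T A B f 1 (S0, S1, rest)).1.length
      + (pvStep1 T A B f 1 (S0, S1, rest)).2.1.length + rest.length
      = S0.length + S1.length + (pvStep1 T A B f 1 (S0, S1, rest)).2.2.length := l1
  have Q1 : rest.length ≤ (pvStep1 T A B f 1 (S0, S1, rest)).2.2.length := q1
  clear l1 q1
  have h3 : pvStep3 T A B f 1 (pvStep2 T A B f 1 (pvStep1 T A B f 1 (S0, S1, rest)))
      = pvStep2 T A B f 1 (pvStep1 T A B f 1 (S0, S1, rest)) := by
    unfold pvStep3
    rw [if_neg (by norm_num)]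
  unfold pvIter
  rw [h3]
  refine ⟨pvWInv_promote I2 (fun h => absurd h (by norm_num))
      (fun _ => ⟨fun hle => m2b _ (t1 hle), t2⟩), ?_, ?_, ?_, ?_⟩
  · exact fun y hy => m2a y (m1a y hy)
  · exact fun y hy => m2b y (m1b y hy)
  · omega
  · omega

lemma pvCard_le {T : Int} (l : List Int) (h : l.Nodup) (hb : ∀ x ∈ l, 0 ≤ x ∧ x ≤ T) :
    l.length ≤ (T + 1).toNat := by
  have hsub : l.toFinset ⊆ Finset.Icc (0 : Int) T := by
    intro x hx
    have := hb x (List.mem_toFinset.1 hx)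
    exact Finset.mem_Icc.2 (by omega)
  have hc := Finset.card_le_card hsub
  rw [List.toFinset_card_of_nodup h, Int.card_Icc] at hc
  omega

lemma pvBfs_succ_cons (T A B : Int) (fuel : Nat) (S0 S1 : List Int) (f w : Int)
    (rest : List (Int × Int)) :
    pvBfs T A B (fuel + 1) S0 S1 ((f, w) :: rest)
      = pvBfs T A B fuel (pvIter T A B f w S0 S1 rest).1
          (pvIter T A B f w S0 S1 rest).2.1 (pvIter T A B f w S0 S1 rest).2.2 := rfl

-- main BFS lemma: with enough fuel, the result extends the current marks, is sound, and is closed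
lemma pvBfs_spec {T A B : Int} (hT : 0 ≤ T) (hA : 0 ≤ A) (hB : 0 ≤ B) :
    ∀ (fuel : Nat) (S0 S1 : List Int) (q : List (Int × Int)),
      pvInv T A B S0 S1 q →
      4 * (T + 1).toNat + q.length ≤ fuel + 2 * S0.length + 2 * S1.length →
      (∀ x ∈ S0, x ∈ (pvBfs T A B fuel S0 S1 q).1) ∧
      (∀ x ∈ S1, x ∈ (pvBfs T A B fuel S0 S1 q).2) ∧
      pvInv T A B (pvBfs T A B fuel S0 S1 q).1 (pvBfs T A B fuel S0 S1 q).2 [] := by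
  intro fuel
  induction fuel with
  | zero =>
    intro S0 S1 q I hm
    have h0 : S0.length ≤ (T + 1).toNat := pvCard_le S0 I.nodup0 I.bnd0
    have h1 : S1.length ≤ (T + 1).toNat := pvCard_le S1 I.nodup1 I.bnd1
    have hq : q = [] := List.length_eq_zero_iff.1 (by omega)
    subst hq
    exact ⟨fun x h => h, fun x h => h, I⟩
  | succ fuel ih =>
    intro S0 S1 q I hm
    rcases q with _ | ⟨⟨f, w⟩, rest⟩
    · exact ⟨fun x h => h, fun x h => h, I⟩
    · have hq0 := I.qmarked (f, w) List.mem_cons_self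
      have hfb : 0 ≤ f ∧ f ≤ T := by
        rcases hq0 with ⟨_, h⟩ | ⟨_, h⟩
        · exact I.bnd0 f h
        · exact I.bnd1 f h
      have Ipop := pvWInv_pop I
      have hw : w = 0 ∨ w = 1 := by
        rcases hq0 with ⟨h, _⟩ | ⟨h, _⟩
        · exact Or.inl h
        · exact Or.inr h
      simp only [List.length_cons] at hm
      rcases hw with rfl | rfl
      · have hR : pvR0 T A B f := by
          rcases hq0 with ⟨_, h⟩ | ⟨h, _⟩
          · exact I.sound0 f h
          · exact absurd h (by norm_num)
        obtain ⟨Iit, mi0, mi1, mlen, mq⟩ := pvIter_spec0 hT hA hB Ipop hfb hR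
        rw [pvBfs_succ_cons]
        obtain ⟨r0, r1, Ifin⟩ := ih _ _ _ Iit (by omega)
        exact ⟨fun x hx => r0 x (mi0 x hx), fun x hx => r1 x (mi1 x hx), Ifin⟩
      · have hR : pvR1 T A B f := by
          rcases hq0 with ⟨h, _⟩ | ⟨_, h⟩
          · exact absurd h (by norm_num)
          · exact I.sound1 f h
        obtain ⟨Iit, mi0, mi1, mlen, mq⟩ := pvIter_spec1 hT hA hB Ipop hfb hR
        rw [pvBfs_succ_cons]
        obtain ⟨r0, r1, Ifin⟩ := ih _ _ _ Iit (by omega)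
        exact ⟨fun x hx => r0 x (mi0 x hx), fun x hx => r1 x (mi1 x hx), Ifin⟩

lemma pvFoldl_max_congr (l : List Int) (g1 g2 : Int → Bool) (h : ∀ f ∈ l, g1 f = g2 f) :
    ∀ acc : Int, l.foldl (fun acc f => if g1 f then f else acc) acc
      = l.foldl (fun acc f => if g2 f then f else acc) acc := by
  induction l with
  | nil => intro acc; rfl
  | cons a l ih =>
    intro acc
    simp only [List.foldl_cons]
    rw [h a List.mem_cons_self]
    exact ih (fun f hf => h f (List.mem_cons_of_mem _ hf)) _

-- ===== VERDICT (by name: the statement is the Claim_ definition above) =====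
theorem max_fullness_spec : Claim_equal_max_fullness := by
  intro T A B hdom hpre
  obtain ⟨hT, hA, hB⟩ := hpre
  unfold Spec_max_fullness
  have Iinit : pvInv T A B [0] [] [(0, 0)] := by
    refine ⟨List.nodup_singleton 0, List.nodup_nil, ?_, ?_, ?_, ?_, ?_, ?_, ?_⟩
    · intro x hx; rw [List.mem_singleton] at hx; subst hx; exact ⟨le_refl 0, hT⟩
    · intro x hx; simp at hx
    · intro x hx; rw [List.mem_singleton] at hx; subst hx; exact pvR0.zero
    · intro x hx; simp at hx
    · intro p hp; rw [List.mem_singleton] at hp; subst hp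
      exact Or.inl ⟨rfl, List.mem_singleton.2 rfl⟩
    · intro x hx; rw [List.mem_singleton] at hx; subst hx
      exact Or.inl (Or.inl (List.mem_singleton.2 rfl))
    · intro x hx; simp at hx
  obtain ⟨inc0, inc1, Ifin⟩ := pvBfs_spec hT hA hB (4 * T + 5).toNat [0] [] [(0, 0)]
    Iinit (by simp; omega)
  set res := pvBfs T A B (4 * T + 5).toNat [0] [] [(0, 0)] with hres
  have mem0 : ∀ x, x ∈ res.1 ↔ pvR0 T A B x := by
    intro x
    constructor
    · exact Ifin.sound0 x
    · intro h
      induction h with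
      | zero => exact inc0 0 (List.mem_singleton.2 rfl)
      | addA hf hle ih =>
        rcases Ifin.closed0 _ ih with (h | h) | h
        · simp at h
        · exact absurd h not_false
        · exact h.1 hle
      | addB hf hle ih =>
        rcases Ifin.closed0 _ ih with (h | h) | h
        · simp at h
        · exact absurd h not_false
        · exact h.2.1 hle
  have mem1 : ∀ x, x ∈ res.2 ↔ pvR1 T A B x := by
    intro x
    constructor
    · exact Ifin.sound1 x
    · intro h
      induction h with
      | half hf =>
        rcases Ifin.closed0 _ ((mem0 _).2 hf) with (h | h) | h
        · simp at h
        · exact absurd h not_false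
        · exact h.2.2
      | addA hf hle ih =>
        rcases Ifin.closed1 _ ih with (h | h) | h
        · simp at h
        · exact absurd h not_false
        · exact h.1 hle
      | addB hf hle ih =>
        rcases Ifin.closed1 _ ih with (h | h) | h
        · simp at h
        · exact absurd h not_false
        · exact h.2 hle
  -- relate B's boolean arrays to the function model
  have hinit : ∀ y, 0 ≤ y →
      PySem.List.pyGetD (PySem.List.pySetD (List.replicate (T + 1).toNat false) 0 true) y false
        = pvSet (fun _ => false) 0 y := by
    intro y hy
    rw [pvGetD_set_point _ 0 y le_rfl (by simp only [List.length_replicate]; omega) hy]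
    simp [pvSet, pvGetD_replicate]
  obtain ⟨hL0, hR0⟩ := pvSweepL_commute hT hA hB (PySem.List.pyRange 0 (T + 1) 1)
    pvRange_bounds (PySem.List.pySetD (List.replicate (T + 1).toNat false) 0 true)
    (pvSet (fun _ => false) 0) (by simp) hinit
  have hR0' : ∀ y, 0 ≤ y → PySem.List.pyGetD
      (pvSweepL T A B (PySem.List.pySetD (List.replicate (T + 1).toNat false) 0 true)) y false
      = pvSweep T A B (pvSet (fun _ => false) 0) y := hR0
  have hL0' : (pvSweepL T A B
      (PySem.List.pySetD (List.replicate (T + 1).toNat false) 0 true)).length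
      = (T + 1).toNat := hL0
  obtain ⟨hLs, hRs⟩ := pvSeedL_commute hT
    (pvSweepL T A B (PySem.List.pySetD (List.replicate (T + 1).toNat false) 0 true))
    (pvSweep T A B (pvSet (fun _ => false) 0)) hR0'
    (PySem.List.pyRange 0 (T + 1) 1) pvRange_bounds
    (List.replicate (T + 1).toNat false) (fun _ => false) (by simp)
    (fun y _ => pvGetD_replicate _ y)
  obtain ⟨hL1, hR1⟩ := pvSweepL_commute hT hA hB (PySem.List.pyRange 0 (T + 1) 1)
    pvRange_bounds _ _ hLs hRs
  show max_fullness T A B = max_fullness_alt T A B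
  unfold max_fullness max_fullness_alt
  rw [← hres]
  refine pvFoldl_max_congr _ (fun f => res.1.contains f || res.2.contains f)
    (fun f => PySem.List.pyGetD (pvSweepL T A B
        (PySem.List.pySetD (List.replicate (T + 1).toNat false) 0 true)) f false ||
      PySem.List.pyGetD (pvSweepL T A B ((PySem.List.pyRange 0 (T + 1) 1).foldl
        (fun arr f => if PySem.List.pyGetD (pvSweepL T A B
            (PySem.List.pySetD (List.replicate (T + 1).toNat false) 0 true)) f false then
          PySem.List.pySetD arr (PySem.Int.floordiv f 2) true else arr)
        (List.replicate (T + 1).toNat false))) f false) ?_ 0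
  intro f hf
  beta_reduce
  have hf0 : 0 ≤ f ∧ f ≤ T := pvRange_bounds f hf
  have e0 : PySem.List.pyGetD (pvSweepL T A B
      (PySem.List.pySetD (List.replicate (T + 1).toNat false) 0 true)) f false
      = pvSweep T A B (pvSet (fun _ => false) 0) f := hR0' f hf0.1
  have e1 : PySem.List.pyGetD (pvSweepL T A B ((PySem.List.pyRange 0 (T + 1) 1).foldl
      (fun arr f => if PySem.List.pyGetD (pvSweepL T A B
          (PySem.List.pySetD (List.replicate (T + 1).toNat false) 0 true)) f false then
        PySem.List.pySetD arr (PySem.Int.floordiv f 2) true else arr)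
      (List.replicate (T + 1).toNat false))) f false
      = pvSweep T A B ((PySem.List.pyRange 0 (T + 1) 1).foldl
        (fun r g => if pvSweep T A B (pvSet (fun _ => false) 0) g then
          pvSet r (PySem.Int.floordiv g 2) else r) (fun _ => false)) f := hR1 f hf0.1
  rw [e0, e1, Bool.eq_iff_iff]
  simp only [Bool.or_eq_true]
  constructor
  · rintro (h | h)
    · exact Or.inl ((pvR0_sweep hT hA hB f).2 ((mem0 f).1 (List.contains_iff_mem.1 h)))
    · exact Or.inr ((pvR1_sweep hT hA hB f).2 ((mem1 f).1 (List.contains_iff_mem.1 h)))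
  · rintro (h | h)
    · exact Or.inl (List.contains_iff_mem.2 ((mem0 f).2 ((pvR0_sweep hT hA hB f).1 h)))
    · exact Or.inr (List.contains_iff_mem.2 ((mem1 f).2 ((pvR1_sweep hT hA hB f).1 h)))
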